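-- pv_equiv track=rewrite | github.com/maudwalsche/Comparing-Frequency-Tagging-Analysis-Methods-for-Measuring-Statistical-Learning-in-Children | SICR_SCORING_SCRIPT.py | remove_rep_hes
-- ===== SOURCE A (Python) =====
-- def remove_rep_hes(resp):
--     syllables = resp.lower().split()
--     result = []
--     for i in range(len(syllables)):
--         if result and syllables[i] == result[-1]:  # repetitions
--             continue
--         if i + 1 < len(syllables) and syllables[i] in syllables[i + 1]:  # hesitations
--             continue
--         result.append(syllables[i])
--
--     return ' '.join(result)
-- ===== SOURCE B (Python) =====
-- def remove_rep_hes(resp):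
--     syllables = resp.lower().split()
--     # pass 1: drop hesitations (a syllable contained in the NEXT original syllable)
--     filtered = [x for x, nxt in zip(syllables, syllables[1:]) if x not in nxt]
--     if syllables:
--         filtered.append(syllables[-1])
--     # pass 2: collapse consecutive duplicates
--     out = []
--     for s in filtered:
--         if not out or s != out[-1]:
--             out.append(s)
--     return ' '.join(out)
-- ===== Notes on version B (the rewrite author's own statement) =====
-- stated objective: simpler
-- what changed: A's single index loop that interleaves the repetition check (against the accumulator's last element) and the hesitation check is split into two separate passes: a zip-based filter dropping syllables contained in their original successor, then a fold collapsing consecutive duplicates.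
import Mathlib
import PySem

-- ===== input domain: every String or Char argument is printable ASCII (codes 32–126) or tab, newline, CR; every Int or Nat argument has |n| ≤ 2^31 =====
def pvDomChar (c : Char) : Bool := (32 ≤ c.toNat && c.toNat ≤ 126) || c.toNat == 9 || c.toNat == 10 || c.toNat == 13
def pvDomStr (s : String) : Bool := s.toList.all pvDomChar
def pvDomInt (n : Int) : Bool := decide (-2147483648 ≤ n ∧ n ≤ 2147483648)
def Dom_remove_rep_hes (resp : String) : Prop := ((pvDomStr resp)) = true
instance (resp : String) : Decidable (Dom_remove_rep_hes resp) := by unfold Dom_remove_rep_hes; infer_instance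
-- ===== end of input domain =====

-- B replaces A's single interleaved index loop by two separate passes (filter hesitations, then
-- collapse consecutive repetitions); objective: simpler decomposition, same cost.

-- ===== PORT A =====
-- literal transliteration of Source A: one loop over range(len(syllables)) with an accumulator `result`
def remove_rep_hes (resp : String) : String :=
  let syllables := PySem.Str.split₀ (PySem.Str.lower resp)
  let result :=
    (PySem.List.pyRange 0 (syllables.length : Int) 1).foldl
      (fun result i =>
        if result ≠ [] ∧ PySem.List.pyGetD syllables i "" = PySem.List.pyGetD result (-1) "" then
          result
        else if i + 1 < (syllables.length : Int) ∧
            PySem.Str.isIn (PySem.List.pyGetD syllables i "") (PySem.List.pyGetD syllables (i + 1) "") = true then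
          result
        else result ++ [PySem.List.pyGetD syllables i ""]) []
  PySem.Str.join " " result

-- ===== PORT B =====
-- literal transliteration of Source B: zip-comprehension filter, append last, then a dedup fold
def remove_rep_hes_alt (resp : String) : String :=
  let syllables := PySem.Str.split₀ (PySem.Str.lower resp)
  let filtered :=
    ((syllables.zip (PySem.List.slice syllables (some 1) none)).filter
      (fun p => !PySem.Str.isIn p.1 p.2)).map (·.1)
  let filtered :=
    if syllables ≠ [] then filtered ++ [PySem.List.pyGetD syllables (-1) ""] else filtered
  let out := filtered.foldl
      (fun out s =>
        if out = [] ∨ s ≠ PySem.List.pyGetD out (-1) "" then out ++ [s] else out) []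
  PySem.Str.join " " out

-- ===== PRECONDITION & SPEC =====
def Spec_remove_rep_hes (resp : String) (out : String) : Prop := out = remove_rep_hes_alt resp
instance (resp : String) (out : String) : Decidable (Spec_remove_rep_hes resp out) := by unfold Spec_remove_rep_hes; infer_instance

-- ===== CLAIM (what is proved, stated in full; the proofs are below) =====
def Claim_equal_remove_rep_hes : Prop := ∀ (resp : String), Dom_remove_rep_hes resp → Spec_remove_rep_hes resp (remove_rep_hes resp)

-- ===== LEMMAS AND PROOFS =====

-- structural rephrasing of A's loop: process the remaining syllables with the accumulator
def pvSpecA : List String → List String → List String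
  | [], acc => acc
  | x :: rest, acc =>
    if acc ≠ [] ∧ x = PySem.List.pyGetD acc (-1) "" then pvSpecA rest acc
    else if rest ≠ [] ∧ PySem.Str.isIn x rest.headI = true then pvSpecA rest acc
    else pvSpecA rest (acc ++ [x])

-- B's first pass, written structurally
def pvFilterHes : List String → List String
  | [] => []
  | [x] => [x]
  | x :: y :: rest => (if PySem.Str.isIn x y then [] else [x]) ++ pvFilterHes (y :: rest)

-- A's indexed foldl equals the structural recursion on the remaining suffix
lemma pvLoopA (syll : List String) :
    ∀ (m k : Nat), syll.length - k = m → k ≤ syll.length → ∀ (acc : List String),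
    (PySem.List.pyRange (k : Int) (syll.length : Int) 1).foldl
      (fun result i =>
        if result ≠ [] ∧ PySem.List.pyGetD syll i "" = PySem.List.pyGetD result (-1) "" then
          result
        else if i + 1 < (syll.length : Int) ∧
            PySem.Str.isIn (PySem.List.pyGetD syll i "") (PySem.List.pyGetD syll (i + 1) "") = true then
          result
        else result ++ [PySem.List.pyGetD syll i ""]) acc
    = pvSpecA (syll.drop k) acc := by
  intro m
  induction m with
  | zero =>
    intro k hk hle acc
    have hk' : k = syll.length := by omega
    subst hk'
    rw [PySem.List.pyRange_one_eq_nil (by omega), List.drop_length]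
    rfl
  | succ n ih =>
    intro k hk hle acc
    have hklt : k < syll.length := by omega
    rw [PySem.List.pyRange_one_cons (by exact_mod_cast hklt)]
    rw [List.foldl_cons]
    have hdrop : syll.drop k = syll[k] :: syll.drop (k + 1) :=
      List.drop_eq_getElem_cons hklt
    have hget : PySem.List.pyGetD syll (k : Int) "" = syll[k] := by
      simp [hklt]
    have hrest : syll.drop (k + 1) ≠ [] ↔ (k : Int) + 1 < (syll.length : Int) := by
      rw [← List.length_pos_iff_ne_nil, List.length_drop]
      omega
    have ihk := fun acc => ih (k + 1) (by omega) (by omega) acc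
    have hcast : ((k : Int) + 1) = ((k + 1 : Nat) : Int) := by push_cast; ring
    rw [hdrop]
    show _ = pvSpecA (syll[k] :: syll.drop (k + 1)) acc
    rw [pvSpecA]
    by_cases h1 : acc ≠ [] ∧ syll[k] = PySem.List.pyGetD acc (-1) ""
    · rw [if_pos h1, hcast, ihk]
      rw [if_pos (by rw [hget]; exact h1)]
    · rw [if_neg h1]
      by_cases h2 : syll.drop (k + 1) ≠ [] ∧ PySem.Str.isIn syll[k] (syll.drop (k + 1)).headI = true
      · have hlt : (k : Int) + 1 < (syll.length : Int) := hrest.mp h2.1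
        have hk1 : k + 1 < syll.length := by exact_mod_cast hlt
        have hhead : (syll.drop (k + 1)).headI = syll[k + 1] := by
          rw [List.drop_eq_getElem_cons hk1]; rfl
        have hget1 : PySem.List.pyGetD syll ((k : Int) + 1) "" = syll[k + 1] := by
          rw [hcast, PySem.List.pyGetD_natCast]
          exact List.getD_eq_getElem _ _ hk1
        rw [if_pos h2, if_neg (by rw [hget]; exact h1),
            if_pos (by rw [hget, hget1, ← hhead]; exact ⟨hlt, h2.2⟩), hcast, ihk]
      · rw [if_neg h2, if_neg (by rw [hget]; exact h1)]
        rw [if_neg (by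
          rw [hget]
          intro hcon
          exact h2 ⟨hrest.mpr hcon.1, by
            have hk1 : k + 1 < syll.length := by exact_mod_cast hcon.1
            have hhead : (syll.drop (k + 1)).headI = syll[k + 1] := by
              rw [List.drop_eq_getElem_cons hk1]; rfl
            have hget1 : PySem.List.pyGetD syll ((k : Int) + 1) "" = syll[k + 1] := by
              rw [hcast, PySem.List.pyGetD_natCast]
              exact List.getD_eq_getElem _ _ hk1
            rw [hhead, ← hget1]; exact hcon.2⟩)]
        rw [hcast, ihk, hget]

-- B's filtered list equals the structural first pass
lemma pvFilteredEq (syll : List String) :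
    (if syll ≠ [] then
        (((syll.zip (PySem.List.slice syll (some 1) none)).filter
          (fun p => !PySem.Str.isIn p.1 p.2)).map (·.1)) ++ [PySem.List.pyGetD syll (-1) ""]
     else ((syll.zip (PySem.List.slice syll (some 1) none)).filter
          (fun p => !PySem.Str.isIn p.1 p.2)).map (·.1))
    = pvFilterHes syll := by
  rw [PySem.List.slice_from_one]
  induction syll with
  | nil => simp [pvFilterHes]
  | cons x rest ih =>
    cases rest with
    | nil =>
      rw [if_pos (by simp), PySem.List.pyGetD_neg_one [x] "" (by simp)]
      simp [pvFilterHes]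
    | cons y rest' =>
      have hne : (y :: rest' : List String) ≠ [] := by simp
      have hlast : PySem.List.pyGetD (x :: y :: rest') (-1) ""
          = PySem.List.pyGetD (y :: rest') (-1) "" := by
        rw [PySem.List.pyGetD_neg_one (x :: y :: rest') "" (by simp),
            PySem.List.pyGetD_neg_one (y :: rest') "" hne]
        simp [List.getLast_cons]
      rw [if_pos hne] at ih
      rw [if_pos (by simp), hlast, pvFilterHes]
      by_cases hin : PySem.Chars.isIn x.toList y.toList = true
      · simpa [hin] using ih
      · simpa [hin] using ih

-- the structural A-loop equals B's dedup fold applied to the filtered stream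
lemma pvSpecA_eq_fold (pend : List String) :
    ∀ acc, pvSpecA pend acc
      = (pvFilterHes pend).foldl
          (fun out s =>
            if out = [] ∨ s ≠ PySem.List.pyGetD out (-1) "" then out ++ [s] else out) acc := by
  induction pend with
  | nil => intro acc; rfl
  | cons x rest ih =>
    intro acc
    cases rest with
    | nil =>
      show pvSpecA [x] acc = _
      rw [pvSpecA, pvFilterHes]
      by_cases h1 : acc ≠ [] ∧ x = PySem.List.pyGetD acc (-1) ""
      · rw [if_pos h1]
        simp only [List.foldl_cons, List.foldl_nil]
        rw [if_neg (by push_neg; exact ⟨h1.1, h1.2⟩)]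
        rfl
      · rw [if_neg h1, if_neg (by simp)]
        simp only [List.foldl_cons, List.foldl_nil]
        rw [if_pos (by by_cases hacc : acc = [] <;> simp_all)]
        rfl
    | cons y rest' =>
      show pvSpecA (x :: y :: rest') acc = _
      rw [pvSpecA, pvFilterHes]
      by_cases h1 : acc ≠ [] ∧ x = PySem.List.pyGetD acc (-1) ""
      · rw [if_pos h1]
        by_cases hin : PySem.Str.isIn x y = true
        · rw [if_pos hin]; simpa using ih acc
        · rw [if_neg hin]
          simp only [List.singleton_append, List.foldl_cons]
          rw [if_neg (by push_neg; exact ⟨h1.1, h1.2⟩)]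
          exact ih acc
      · rw [if_neg h1]
        by_cases h2 : (y :: rest' : List String) ≠ [] ∧ PySem.Str.isIn x (y :: rest').headI = true
        · have hin : PySem.Str.isIn x y = true := h2.2
          rw [if_pos h2, if_pos hin]
          simpa using ih acc
        · have hin : ¬ PySem.Str.isIn x y = true := fun h => h2 ⟨by simp, h⟩
          rw [if_neg h2, if_neg hin]
          simp only [List.singleton_append, List.foldl_cons]
          rw [if_pos (by by_cases hacc : acc = [] <;> simp_all)]
          exact ih (acc ++ [x])

-- ===== VERDICT (by name: the statement is the Claim_ definition above) =====
theorem remove_rep_hes_spec : Claim_equal_remove_rep_hes := by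
  intro resp _
  unfold Spec_remove_rep_hes remove_rep_hes remove_rep_hes_alt
  set syll := PySem.Str.split₀ (PySem.Str.lower resp) with hs
  have h := pvLoopA syll (syll.length - 0) 0 rfl (by omega) []
  rw [Nat.cast_zero, List.drop_zero] at h
  simp only [h, pvSpecA_eq_fold]
  rw [← pvFilteredEq syll]
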